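-- pv_equiv track=rewrite | github.com/iskren-yordanov/SoftUniTasks_Python | 05.Excercise_Graph/03.Salaries.py | dfs
-- ===== SOURCE A (Python) =====
-- def dfs(node, graph, salaries):
--     if salaries[node] is not None:
--         return salaries[node]
--
--     if len(graph[node]) == 0:
--         salaries[node] = 1
--         return 1
--
--     salary = 0
--     for child in graph[node]:
--         salary += dfs(child, graph, salaries)
--
--     salaries[node] = salary
--     return salary
-- ===== SOURCE B (Python) =====
-- def dfs(node, graph, salaries):
--     if salaries[node] is not None:
--         return salaries[node]
--     stack = [node]
--     while stack:
--         n = stack.pop()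
--         if salaries[n] is not None:
--             continue
--         children = graph[n]
--         pending = [c for c in children if salaries[c] is None]
--         if pending:
--             stack.append(n)
--             stack.extend(pending)
--         else:
--             salaries[n] = sum(salaries[c] for c in children) if children else 1
--     return salaries[node]
-- ===== Notes on version B (the rewrite author's own statement) =====
-- stated objective: alternative
-- what changed: A's memoized recursion (recursive calls threading the mutable salaries dict) is replaced by an iterative post-order traversal with an explicit stack: a popped node whose unmemoized children are all processed gets its salary written, otherwise it is re-pushed under its pending children; same memo-skip semantics and leaf=1, no recursion.
import Mathlib
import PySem

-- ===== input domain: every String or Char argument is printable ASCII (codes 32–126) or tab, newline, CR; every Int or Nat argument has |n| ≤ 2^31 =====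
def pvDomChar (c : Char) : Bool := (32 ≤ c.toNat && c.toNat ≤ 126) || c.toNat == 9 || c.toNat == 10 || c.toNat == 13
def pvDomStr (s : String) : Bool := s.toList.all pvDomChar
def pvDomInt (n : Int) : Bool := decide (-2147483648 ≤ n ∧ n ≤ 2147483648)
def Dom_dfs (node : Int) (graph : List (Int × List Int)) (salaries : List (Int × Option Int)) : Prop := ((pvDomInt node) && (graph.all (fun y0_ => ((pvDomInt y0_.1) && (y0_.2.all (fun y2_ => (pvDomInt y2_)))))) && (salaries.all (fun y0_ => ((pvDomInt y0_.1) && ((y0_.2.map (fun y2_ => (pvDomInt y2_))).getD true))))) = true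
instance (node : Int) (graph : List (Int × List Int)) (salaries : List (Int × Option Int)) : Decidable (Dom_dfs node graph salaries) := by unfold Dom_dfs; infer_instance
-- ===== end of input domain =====

-- B replaces A's memoized recursion by an iterative post-order traversal with an explicit stack
-- (same memo-skip semantics); both A and B mutate `salaries` in Python (possibly writing memo
-- entries in a different insertion order) — the equivalence proved here is about the RETURN value.

-- ===== PORT A =====
-- A's recursion carries the mutable dict `salaries` as explicit state; fuel is only a totality
-- guard (Python's recursion), never reached on Pre_ inputs.  `none` = KeyError / fuel exhaustion.
mutual
def pvDfsA (g : PySem.Dict Int (List Int)) : Nat → Int → PySem.Dict Int (Option Int) →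
    Option (Int × PySem.Dict Int (Option Int))
  | 0, _, _ => none
  | fuel + 1, node, sal =>
    match PySem.Dict.get? sal node with
    | none => none                                 -- KeyError: salaries[node]
    | some (some v) => some (v, sal)               -- memo hit: return salaries[node]
    | some none =>
      match PySem.Dict.get? g node with
      | none => none                               -- KeyError: graph[node]
      | some [] => some (1, PySem.Dict.insert sal node (some 1))   -- leaf: salaries[node] = 1
      | some (c :: cs) =>
        match pvDfsAKids g fuel (c :: cs) 0 sal with   -- salary = 0; for child in graph[node]: …
        | none => none
        | some (salary, sal') => some (salary, PySem.Dict.insert sal' node (some salary))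
  termination_by f _ _ => (f, 0)

def pvDfsAKids (g : PySem.Dict Int (List Int)) : Nat → List Int → Int →
    PySem.Dict Int (Option Int) → Option (Int × PySem.Dict Int (Option Int))
  | _, [], acc, sal => some (acc, sal)
  | fuel, c :: cs, acc, sal =>
    match pvDfsA g fuel c sal with                 -- salary += dfs(child, graph, salaries)
    | none => none
    | some (v, sal') => pvDfsAKids g fuel cs (acc + v) sal'
  termination_by f cs _ _ => (f, cs.length + 1)
end

def dfs (node : Int) (graph : List (Int × List Int)) (salaries : List (Int × Option Int)) : Int :=
  match pvDfsA (PySem.Dict.mk graph) (salaries.length + 2) node (PySem.Dict.mk salaries) with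
  | some (v, _) => v
  | none => 0                                      -- unreachable under Pre_dfs

-- ===== PORT B =====
-- pending = [c for c in children if salaries[c] is None]   (none = KeyError on a missing child)
def pvPendB (sal : PySem.Dict Int (Option Int)) : List Int → Option (List Int)
  | [] => some []
  | c :: cs =>
    match PySem.Dict.get? sal c with
    | none => none
    | some none => (pvPendB sal cs).map (c :: ·)
    | some (some _) => pvPendB sal cs

-- sum(salaries[c] for c in children); only evaluated when every child is memoized (pending = [])
def pvSumB (sal : PySem.Dict Int (Option Int)) (cs : List Int) : Int :=
  cs.foldl (fun acc c => acc + ((PySem.Dict.get? sal c).getD (some 0)).getD 0) 0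

-- the while-stack loop; head of the list = top of the stack; fuel is only a totality guard
def pvLoopB (g : PySem.Dict Int (List Int)) : Nat → List Int → PySem.Dict Int (Option Int) →
    Option (PySem.Dict Int (Option Int))
  | _, [], sal => some sal
  | 0, _ :: _, _ => none                           -- fuel exhausted (unreachable under Pre_dfs)
  | fuel + 1, n :: stack, sal =>
    match PySem.Dict.get? sal n with
    | none => none                                 -- KeyError: salaries[n]
    | some (some _) => pvLoopB g fuel stack sal    -- continue
    | some none =>
      match PySem.Dict.get? g n with
      | none => none                               -- KeyError: graph[n]
      | some children =>
        match pvPendB sal children with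
        | none => none
        | some [] =>
          pvLoopB g fuel stack
            (PySem.Dict.insert sal n (some (if children.isEmpty then 1 else pvSumB sal children)))
        | some (p :: ps) =>
          pvLoopB g fuel ((p :: ps).reverse ++ n :: stack) sal   -- push n back, extend pending

-- fuel bound: enough steps to settle a node of closure-rank i when no adjacency list exceeds gsz
def pvFuelB (gsz : Nat) : Nat → Nat
  | 0 => 1
  | i + 1 => gsz * pvFuelB gsz i + 2

def dfs_alt (node : Int) (graph : List (Int × List Int)) (salaries : List (Int × Option Int)) : Int :=
  match PySem.Dict.get? (PySem.Dict.mk salaries) node with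
  | none => 0                                      -- KeyError (outside Pre_dfs)
  | some (some v) => v                             -- if salaries[node] is not None: return it
  | some none =>
    match pvLoopB (PySem.Dict.mk graph)
        (pvFuelB ((graph.map (fun p => p.2.length)).sum) (salaries.length + 1))
        [node] (PySem.Dict.mk salaries) with
    | none => 0
    | some sal' =>
      match PySem.Dict.get? sal' node with         -- return salaries[node]
      | some (some v) => v
      | _ => 0

-- ===== PRECONDITION & SPEC =====
-- one round of the determined-set closure: a salaries key is determined if it is already
-- memoized, or it is listed in the graph and all its children are already in the determined set
-- (a shape condition on the two dicts; no salary values are computed)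
def pvStep (g : PySem.Dict Int (List Int)) (s : PySem.Dict Int (Option Int))
    (det : List Int) : List Int :=
  (PySem.Dict.keys s).filter (fun n =>
    ((PySem.Dict.get? s n).getD none).isSome
      || (PySem.Dict.get? g n).elim false (fun cs => cs.all (fun c => det.contains c)))

-- Pre_dfs = exactly the inputs on which Python A returns normally: `node` lies in the least
-- fixed point of the determined-set closure (reached after at most |salaries| + 1 rounds).
-- A missing key means KeyError, and a node on a cycle or above a dangling reference is never
-- determined (A raises KeyError or RecursionError there).
def Pre_dfs (node : Int) (graph : List (Int × List Int)) (salaries : List (Int × Option Int)) : Prop :=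
  node ∈ (pvStep (PySem.Dict.mk graph) (PySem.Dict.mk salaries))^[salaries.length + 1] []
instance (node : Int) (graph : List (Int × List Int)) (salaries : List (Int × Option Int)) :
    Decidable (Pre_dfs node graph salaries) := by unfold Pre_dfs; infer_instance

def pvWitness_dfs : Int × (List (Int × List Int)) × (List (Int × Option Int)) :=
  (0, [(0, [1, 2]), (1, []), (2, [])], [(0, none), (1, none), (2, some 5)])

def Spec_dfs (node : Int) (graph : List (Int × List Int)) (salaries : List (Int × Option Int)) (out : Int) : Prop := out = dfs_alt node graph salaries
instance (node : Int) (graph : List (Int × List Int)) (salaries : List (Int × Option Int)) (out : Int) : Decidable (Spec_dfs node graph salaries out) := by unfold Spec_dfs; infer_instance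

-- ===== CLAIM (what is proved, stated in full; the proofs are below) =====
def Claim_equal_dfs : Prop := ∀ (node : Int) (graph : List (Int × List Int)) (salaries : List (Int × Option Int)), Dom_dfs node graph salaries → Pre_dfs node graph salaries → Spec_dfs node graph salaries (dfs node graph salaries)

-- ===== LEMMAS AND PROOFS =====

-- pointwise form of the closure: n is determined within i rounds
def pvSettled (g : PySem.Dict Int (List Int)) (s : PySem.Dict Int (Option Int)) : Nat → Int → Bool
  | 0, _ => false
  | i + 1, n =>
    match PySem.Dict.get? s n with
    | some (some _) => true
    | some none =>
      match PySem.Dict.get? g n with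
      | some cs => cs.all (pvSettled g s i)
      | none => false
    | none => false

lemma pvStep_iterate_eq_settled (g : PySem.Dict Int (List Int)) (s : PySem.Dict Int (Option Int)) :
    ∀ i n, n ∈ (pvStep g s)^[i] [] ↔ pvSettled g s i n = true := by
  intro i
  induction i with
  | zero => intro n; simp [pvSettled]
  | succ i ih =>
    intro n
    rw [Function.iterate_succ_apply', pvSettled]
    unfold pvStep
    rw [List.mem_filter]
    cases hs : PySem.Dict.get? s n with
    | none =>
      have hk : n ∉ PySem.Dict.keys s := (PySem.Dict.get?_eq_none_iff_not_mem_keys s n).mp hs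
      constructor
      · rintro ⟨hmem, _⟩; exact absurd hmem hk
      · intro h; exact absurd h (by simp)
    | some o =>
      have hk : n ∈ PySem.Dict.keys s := by
        by_contra hk
        rw [← PySem.Dict.get?_eq_none_iff_not_mem_keys] at hk
        rw [hk] at hs; cases hs
      cases o with
      | some w => simp [hk]
      | none =>
        cases hgn : PySem.Dict.get? g n with
        | none =>
          constructor
          · rintro ⟨_, hfalse⟩; simp at hfalse
          · intro h; exact absurd h (by simp)
        | some cs =>
          simp only [hk, true_and, Option.getD_some, Option.isSome_none, Bool.false_or,
            Option.elim_some, List.all_eq_true]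
          constructor
          · intro h c hc
            have := h c hc
            rw [List.contains_iff_mem] at this
            exact (ih c).mp this
          · intro h c hc
            rw [List.contains_iff_mem]
            exact (ih c).mpr (h c hc)

-- the (pure) salary value of n with i closure rounds, read off the ORIGINAL dicts
def pvVal (g : PySem.Dict Int (List Int)) (s : PySem.Dict Int (Option Int)) : Nat → Int → Option Int
  | 0, _ => none
  | i + 1, n =>
    match PySem.Dict.get? s n with
    | some (some v) => some v
    | some none =>
      match PySem.Dict.get? g n with
      | some [] => some 1
      | some (c :: cs) => ((c :: cs).mapM (pvVal g s i)).map List.sum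
      | none => none
    | none => none

lemma pvVal_mono (g : PySem.Dict Int (List Int)) (s : PySem.Dict Int (Option Int)) :
    ∀ i n v, pvVal g s i n = some v → pvVal g s (i + 1) n = some v := by
  intro i
  induction i with
  | zero => intro n v h; simp [pvVal] at h
  | succ i ih =>
    have hm : ∀ (l : List Int) vs, l.mapM (pvVal g s i) = some vs →
        l.mapM (pvVal g s (i + 1)) = some vs := by
      intro l
      induction l with
      | nil => intro vs h; simpa using h
      | cons c l ihl =>
        intro vs h
        simp only [List.mapM_cons, Option.bind_eq_bind, Option.bind_eq_some_iff,
          Option.pure_def, Option.some.injEq] at h ⊢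
        obtain ⟨w, hw, vs', hvs', rfl⟩ := h
        exact ⟨w, ih c w hw, vs', ihl vs' hvs', rfl⟩
    intro n v h
    rw [pvVal] at h ⊢
    cases hs : PySem.Dict.get? s n with
    | none => rw [hs] at h; exact absurd h (by simp)
    | some o =>
      rw [hs] at h
      cases o with
      | some w => simpa using h
      | none =>
        cases hgn : PySem.Dict.get? g n with
        | none => rw [hgn] at h; exact absurd h (by simp)
        | some cs =>
          rw [hgn] at h
          cases cs with
          | nil => simpa using h
          | cons c cs =>
            simp only [Option.map_eq_some_iff] at h ⊢
            obtain ⟨vs, hvs, rfl⟩ := h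
            exact ⟨vs, hm _ vs hvs, rfl⟩

lemma pvVal_le_mono (g : PySem.Dict Int (List Int)) (s : PySem.Dict Int (Option Int))
    {i j : Nat} (h : i ≤ j) {n v} (hv : pvVal g s i n = some v) : pvVal g s j n = some v := by
  induction j with
  | zero =>
    have : i = 0 := Nat.le_zero.mp h
    subst this; exact hv
  | succ j ih =>
    rcases Nat.lt_or_ge i (j + 1) with hlt | hge
    · exact pvVal_mono g s j n v (ih (Nat.lt_succ_iff.mp hlt))
    · have : i = j + 1 := Nat.le_antisymm h hge
      subst this; exact hv

lemma pvVal_uniq (g : PySem.Dict Int (List Int)) (s : PySem.Dict Int (Option Int))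
    {i j : Nat} {n v w} (hv : pvVal g s i n = some v) (hw : pvVal g s j n = some w) : v = w := by
  rcases Nat.le_total i j with h | h
  · have := pvVal_le_mono g s h hv
    rw [this] at hw; exact (Option.some.injEq _ _ ▸ hw)
  · have := pvVal_le_mono g s h hw
    rw [this] at hv; exact (Option.some.injEq _ _ ▸ hv).symm

lemma pvVal_key (g : PySem.Dict Int (List Int)) (s : PySem.Dict Int (Option Int))
    {i n v} (hv : pvVal g s i n = some v) : PySem.Dict.get? s n ≠ none := by
  cases i with
  | zero => simp [pvVal] at hv
  | succ i =>
    intro hs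
    rw [pvVal, hs] at hv
    exact absurd hv (by simp)

lemma pvSettled_val (g : PySem.Dict Int (List Int)) (s : PySem.Dict Int (Option Int)) :
    ∀ i n, pvSettled g s i n = true → ∃ v, pvVal g s i n = some v := by
  intro i
  induction i with
  | zero => intro n h; simp [pvSettled] at h
  | succ i ih =>
    have hm : ∀ (l : List Int), (∀ c ∈ l, pvSettled g s i c = true) →
        ∃ vs, l.mapM (pvVal g s i) = some vs := by
      intro l
      induction l with
      | nil => intro _; exact ⟨[], rfl⟩
      | cons c l ihl =>
        intro hall
        obtain ⟨v, hv⟩ := ih c (hall c (by simp))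
        obtain ⟨vs, hvs⟩ := ihl (fun x hx => hall x (by simp [hx]))
        exact ⟨v :: vs, by simp [List.mapM_cons, hv, hvs]⟩
    intro n h
    rw [pvSettled] at h
    rw [pvVal]
    cases hs : PySem.Dict.get? s n with
    | none => rw [hs] at h; exact absurd h (by simp)
    | some o =>
      rw [hs] at h
      cases o with
      | some w => exact ⟨w, rfl⟩
      | none =>
        cases hgn : PySem.Dict.get? g n with
        | none => rw [hgn] at h; exact absurd h (by simp)
        | some cs =>
          rw [hgn] at h
          cases cs with
          | nil => exact ⟨1, rfl⟩
          | cons c cs' =>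
            obtain ⟨vs, hvs⟩ := hm (c :: cs') (by simpa [List.all_eq_true] using h)
            exact ⟨vs.sum, by simp [hvs]⟩

-- run-time dict invariant: every memoized value is the pure value; keys and the None entries
-- come from the original dict
def pvInv (g : PySem.Dict Int (List Int)) (s0 d : PySem.Dict Int (Option Int)) : Prop :=
  (∀ n w, PySem.Dict.get? d n = some (some w) → ∃ j, pvVal g s0 j n = some w) ∧
  (∀ n, PySem.Dict.get? d n = some none → PySem.Dict.get? s0 n = some none) ∧
  (∀ n, PySem.Dict.get? d n = none ↔ PySem.Dict.get? s0 n = none)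

def pvExt (d d' : PySem.Dict Int (Option Int)) : Prop :=
  ∀ n w, PySem.Dict.get? d n = some (some w) → PySem.Dict.get? d' n = some (some w)

lemma pvInv_init (g : PySem.Dict Int (List Int)) (s0 : PySem.Dict Int (Option Int)) : pvInv g s0 s0 := by
  refine ⟨fun n w h => ⟨1, ?_⟩, fun n h => h, fun n => Iff.rfl⟩
  rw [pvVal, h]

lemma pvInv_insert (g : PySem.Dict Int (List Int)) (s0 d : PySem.Dict Int (Option Int))
    {n v i} (hInv : pvInv g s0 d) (hv : pvVal g s0 i n = some v)
    (hkey : PySem.Dict.get? d n ≠ none) :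
    pvInv g s0 (PySem.Dict.insert d n (some v)) ∧ pvExt d (PySem.Dict.insert d n (some v)) := by
  obtain ⟨h1, h2, h3⟩ := hInv
  constructor
  · refine ⟨fun m w hm => ?_, fun m hm => ?_, fun m => ?_⟩
    · rw [PySem.Dict.get?_insert] at hm
      by_cases hmn : m = n
      · subst hmn; simp at hm; exact ⟨i, hm ▸ hv⟩
      · rw [if_neg hmn] at hm; exact h1 m w hm
    · rw [PySem.Dict.get?_insert] at hm
      by_cases hmn : m = n
      · rw [if_pos hmn] at hm; exact absurd hm (by simp)
      · rw [if_neg hmn] at hm; exact h2 m hm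
    · rw [PySem.Dict.get?_insert]
      by_cases hmn : m = n
      · subst hmn
        rw [if_pos rfl]
        exact ⟨fun h => absurd h (by simp), fun h => absurd h (fun hh => hkey ((h3 _).mpr hh))⟩
      · rw [if_neg hmn]; exact h3 m
  · intro m w hm
    rw [PySem.Dict.get?_insert]
    by_cases hmn : m = n
    · subst hmn
      obtain ⟨j, hj⟩ := h1 m w hm
      rw [if_pos rfl, pvVal_uniq g s0 hj hv]
    · rw [if_neg hmn]; exact hm

-- ===== adequacy of PORT A =====
lemma pvA_adeq (g : PySem.Dict Int (List Int)) (s0 : PySem.Dict Int (Option Int)) :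
    ∀ i n v d f, pvInv g s0 d → pvVal g s0 i n = some v → i ≤ f →
      ∃ d', pvDfsA g f n d = some (v, d') ∧ pvInv g s0 d' ∧ pvExt d d' := by
  intro i
  induction i with
  | zero => intro n v d f _ hv _; simp [pvVal] at hv
  | succ i ih =>
    have kids : ∀ (l : List Int) vs acc d f, i ≤ f → pvInv g s0 d →
        l.mapM (pvVal g s0 i) = some vs →
        ∃ d', pvDfsAKids g f l acc d = some (acc + vs.sum, d') ∧ pvInv g s0 d' ∧ pvExt d d' := by
      intro l
      induction l with
      | nil =>
        intro vs acc d f _ hInv h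
        simp only [List.mapM_nil, Option.pure_def, Option.some.injEq] at h
        subst h
        exact ⟨d, by simp [pvDfsAKids], hInv, fun _ _ h => h⟩
      | cons c l ihl =>
        intro vs acc d f hf hInv h
        simp only [List.mapM_cons, Option.bind_eq_bind, Option.bind_eq_some_iff,
          Option.pure_def, Option.some.injEq] at h
        obtain ⟨w, hw, vs', hvs', rfl⟩ := h
        obtain ⟨d1, hA, hInv1, hExt1⟩ := ih c w d f hInv hw hf
        obtain ⟨d2, hK, hInv2, hExt2⟩ := ihl vs' (acc + w) d1 f hf hInv1 hvs'
        refine ⟨d2, ?_, hInv2, fun m u hm => hExt2 m u (hExt1 m u hm)⟩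
        rw [pvDfsAKids, hA]
        show pvDfsAKids g f l (acc + w) d1 = _
        rw [hK]
        simp [add_assoc]
    intro n v d f hInv hv hif
    obtain ⟨f', rfl⟩ : ∃ f', f = f' + 1 := ⟨f - 1, by omega⟩
    have hif' : i ≤ f' := by omega
    rw [pvDfsA]
    cases hd : PySem.Dict.get? d n with
    | none => exact absurd ((hInv.2.2 n).mp hd) (pvVal_key g s0 hv)
    | some o =>
      cases o with
      | some w =>
        obtain ⟨j, hj⟩ := hInv.1 n w hd
        have hwv : w = v := pvVal_uniq g s0 hj hv
        subst hwv
        exact ⟨d, rfl, hInv, fun _ _ h => h⟩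
      | none =>
        have hkey : PySem.Dict.get? d n ≠ none := by rw [hd]; simp
        have hs0 : PySem.Dict.get? s0 n = some none := hInv.2.1 n hd
        rw [pvVal, hs0] at hv
        cases hgn : PySem.Dict.get? g n with
        | none => rw [hgn] at hv; exact absurd hv (by simp)
        | some cs =>
          rw [hgn] at hv
          cases cs with
          | nil =>
            have hv1 : v = 1 := by simpa using hv.symm
            subst hv1
            have hvfull : pvVal g s0 (i + 1) n = some 1 := by rw [pvVal, hs0, hgn]
            obtain ⟨hInv', hExt'⟩ := pvInv_insert g s0 d hInv hvfull hkey
            exact ⟨_, rfl, hInv', hExt'⟩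
          | cons c cs' =>
            simp only [Option.map_eq_some_iff] at hv
            obtain ⟨vs, hvs, rfl⟩ := hv
            obtain ⟨d1, hK, hInv1, hExt1⟩ := kids (c :: cs') vs 0 d f' hif' hInv hvs
            rw [zero_add] at hK
            have hkey1 : PySem.Dict.get? d1 n ≠ none := by
              intro hh; exact hkey ((hInv.2.2 n).mpr ((hInv1.2.2 n).mp hh))
            have hvfull : pvVal g s0 (i + 1) n = some vs.sum := by
              rw [pvVal, hs0, hgn]; simp [hvs]
            obtain ⟨hInv', hExt'⟩ := pvInv_insert g s0 d1 hInv1 hvfull hkey1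
            refine ⟨_, ?_, hInv', fun m u hm => hExt' m u (hExt1 m u hm)⟩
            show (match pvDfsAKids g f' (c :: cs') 0 d with
                  | none => none
                  | some (salary, sal') => some (salary, PySem.Dict.insert sal' n (some salary))) = _
            rw [hK]

-- ===== adequacy of PORT B =====
lemma pvFuelB_pos (gsz : Nat) : ∀ i, 1 ≤ pvFuelB gsz i := by
  intro i; cases i with
  | zero => simp [pvFuelB]
  | succ i => rw [pvFuelB]; omega

lemma pvMapM_mem {α β : Type} (f : α → Option β) :
    ∀ (l : List α) (vs : List β), l.mapM f = some vs → ∀ x ∈ l, ∃ y, f x = some y := by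
  intro l
  induction l with
  | nil => intro vs _ x hx; simp at hx
  | cons c l ihl =>
    intro vs h x hx
    simp only [List.mapM_cons, Option.bind_eq_bind, Option.bind_eq_some_iff,
      Option.pure_def, Option.some.injEq] at h
    obtain ⟨w, hw, vs', hvs', rfl⟩ := h
    rcases List.mem_cons.mp hx with rfl | hx
    · exact ⟨w, hw⟩
    · exact ihl vs' hvs' x hx

lemma pvPendB_sound (sal : PySem.Dict Int (Option Int)) :
    ∀ cs : List Int, (∀ c ∈ cs, PySem.Dict.get? sal c ≠ none) →
      pvPendB sal cs = some (cs.filter (fun c => decide (PySem.Dict.get? sal c = some none))) := by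
  intro cs
  induction cs with
  | nil => intro _; simp [pvPendB]
  | cons c cs ihl =>
    intro h
    have hrec := ihl (fun x hx => h x (by simp [hx]))
    cases hc : PySem.Dict.get? sal c with
    | none => exact absurd hc (h c (by simp))
    | some o =>
      cases o with
      | none => simp [pvPendB, hc, hrec]
      | some w => simp [pvPendB, hc, hrec]

lemma pvSumB_eq (g : PySem.Dict Int (List Int)) (s0 sal : PySem.Dict Int (Option Int)) (i : Nat)
    (hInv : pvInv g s0 sal) :
    ∀ (cs : List Int) (vs : List Int) (acc : Int),
      cs.mapM (pvVal g s0 i) = some vs →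
      (∀ c ∈ cs, ∃ w, PySem.Dict.get? sal c = some (some w)) →
      cs.foldl (fun acc c => acc + ((PySem.Dict.get? sal c).getD (some 0)).getD 0) acc
        = acc + vs.sum := by
  intro cs
  induction cs with
  | nil => intro vs acc h _; simp at h; subst h; simp
  | cons c cs ihl =>
    intro vs acc h hall
    simp only [List.mapM_cons, Option.bind_eq_bind, Option.bind_eq_some_iff,
      Option.pure_def, Option.some.injEq] at h
    obtain ⟨w, hw, vs', hvs', rfl⟩ := h
    obtain ⟨u, hu⟩ := hall c (by simp)
    obtain ⟨j, hj⟩ := hInv.1 c u hu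
    have huw : u = w := pvVal_uniq g s0 hj hw
    subst huw
    rw [List.foldl_cons, ihl vs' _ hvs' (fun x hx => hall x (by simp [hx]))]
    simp [hu, List.sum_cons]
    ring

lemma pvB_adeq (g : PySem.Dict Int (List Int)) (s0 : PySem.Dict Int (Option Int)) (gsz : Nat)
    (hg : ∀ n cs, PySem.Dict.get? g n = some cs → cs.length ≤ gsz) :
    ∀ i n v d stack f, pvInv g s0 d → pvVal g s0 i n = some v →
      ∃ f' d', f ≤ f' ∧
        pvLoopB g (pvFuelB gsz i + f) (n :: stack) d = pvLoopB g f' stack d' ∧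
        pvInv g s0 d' ∧ pvExt d d' ∧ PySem.Dict.get? d' n = some (some v) := by
  intro i
  induction i with
  | zero => intro n v d stack f _ hv; simp [pvVal] at hv
  | succ i ih =>
    have hFpos := pvFuelB_pos gsz i
    have lst : ∀ (l : List Int) d stack f, pvInv g s0 d →
        (∀ c ∈ l, ∃ vc, pvVal g s0 i c = some vc) →
        ∃ f' d', f ≤ f' ∧
          pvLoopB g (l.length * pvFuelB gsz i + f) (l ++ stack) d = pvLoopB g f' stack d' ∧
          pvInv g s0 d' ∧ pvExt d d' ∧
          (∀ c ∈ l, ∃ w, PySem.Dict.get? d' c = some (some w)) := by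
      intro l
      induction l with
      | nil =>
        intro d stack f hInv _
        exact ⟨f, d, le_refl f, by simp, hInv, fun _ _ h => h, by simp⟩
      | cons c l ihl =>
        intro d stack f hInv hall
        obtain ⟨vc, hvc⟩ := hall c (by simp)
        obtain ⟨f1, d1, hf1, heq1, hInv1, hExt1, hmem1⟩ :=
          ih c vc d (l ++ stack) (l.length * pvFuelB gsz i + f) hInv hvc
        obtain ⟨g1, hg1, hfg1⟩ : ∃ g1, f1 = l.length * pvFuelB gsz i + g1 ∧ f ≤ g1 :=
          ⟨f1 - l.length * pvFuelB gsz i, by omega, by omega⟩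
        obtain ⟨f2, d2, hf2, heq2, hInv2, hExt2, hmem2⟩ :=
          ihl d1 stack g1 hInv1 (fun x hx => hall x (by simp [hx]))
        refine ⟨f2, d2, by omega, ?_, hInv2, fun m u hm => hExt2 m u (hExt1 m u hm), ?_⟩
        · calc pvLoopB g ((c :: l).length * pvFuelB gsz i + f) ((c :: l) ++ stack) d
              = pvLoopB g (pvFuelB gsz i + (l.length * pvFuelB gsz i + f)) (c :: (l ++ stack)) d := by
                congr 1; simp [List.length_cons]; ring
            _ = pvLoopB g f1 (l ++ stack) d1 := heq1
            _ = pvLoopB g (l.length * pvFuelB gsz i + g1) (l ++ stack) d1 := by rw [← hg1]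
            _ = pvLoopB g f2 stack d2 := heq2
        · intro x hx
          rcases List.mem_cons.mp hx with rfl | hx
          · exact ⟨vc, hExt2 x vc (hmem1)⟩
          · exact hmem2 x hx
    intro n v d stack f hInv hv
    have hfuel : pvFuelB gsz (i + 1) + f = (gsz * pvFuelB gsz i + 1 + f) + 1 := by
      rw [pvFuelB]; ring
    rw [hfuel, pvLoopB]
    cases hd : PySem.Dict.get? d n with
    | none => exact absurd ((hInv.2.2 n).mp hd) (pvVal_key g s0 hv)
    | some o =>
      cases o with
      | some w =>
        obtain ⟨j, hj⟩ := hInv.1 n w hd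
        have hwv : w = v := pvVal_uniq g s0 hj hv
        subst hwv
        exact ⟨gsz * pvFuelB gsz i + 1 + f, d, by omega, rfl, hInv, fun _ _ h => h, hd⟩
      | none =>
        have hkey : PySem.Dict.get? d n ≠ none := by rw [hd]; simp
        have hs0 : PySem.Dict.get? s0 n = some none := hInv.2.1 n hd
        rw [pvVal, hs0] at hv
        cases hgn : PySem.Dict.get? g n with
        | none => rw [hgn] at hv; exact absurd hv (by simp)
        | some cs =>
          rw [hgn] at hv
          cases cs with
          | nil =>
            have hv1 : v = 1 := by simpa using hv.symm
            subst hv1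
            have hvfull : pvVal g s0 (i + 1) n = some 1 := by rw [pvVal, hs0, hgn]
            obtain ⟨hInv', hExt'⟩ := pvInv_insert g s0 d hInv hvfull hkey
            refine ⟨gsz * pvFuelB gsz i + 1 + f, _, by omega, ?_, hInv', hExt', ?_⟩
            · show pvLoopB g (gsz * pvFuelB gsz i + 1 + f) stack
                (PySem.Dict.insert d n (some (if ([] : List Int).isEmpty then 1 else pvSumB d []))) = _
              simp
            · rw [PySem.Dict.get?_insert, if_pos rfl]
          | cons c cs' =>
            simp only [Option.map_eq_some_iff] at hv
            obtain ⟨vs, hvs, rfl⟩ := hv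
            have hchild := pvMapM_mem (pvVal g s0 i) (c :: cs') vs hvs
            have hpresent : ∀ x ∈ (c :: cs'), PySem.Dict.get? d x ≠ none := by
              intro x hx hnone
              obtain ⟨vx, hvx⟩ := hchild x hx
              exact pvVal_key g s0 hvx ((hInv.2.2 x).mp hnone)
            have hpend := pvPendB_sound d (c :: cs') hpresent
            have hvfull : pvVal g s0 (i + 1) n = some vs.sum := by
              rw [pvVal, hs0, hgn]; simp [hvs]
            have hlen : (c :: cs').length ≤ gsz := hg n (c :: cs') hgn
            cases hpl : (c :: cs').filter (fun c => decide (PySem.Dict.get? d c = some none)) with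
            | nil =>
              -- every child already memoized: settle n immediately
              have hmemo : ∀ x ∈ (c :: cs'), ∃ w, PySem.Dict.get? d x = some (some w) := by
                intro x hx
                have hne : PySem.Dict.get? d x ≠ some none := by
                  intro hh
                  have : x ∈ (c :: cs').filter (fun c => decide (PySem.Dict.get? d c = some none)) :=
                    List.mem_filter.mpr ⟨hx, by simp [hh]⟩
                  rw [hpl] at this; simp at this
                cases hgd : PySem.Dict.get? d x with
                | none => exact absurd hgd (hpresent x hx)
                | some o => cases o with
                  | none => exact absurd hgd hne
                  | some w => exact ⟨w, rfl⟩
              have hsum : pvSumB d (c :: cs') = vs.sum := by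
                have := pvSumB_eq g s0 d i hInv (c :: cs') vs 0 hvs hmemo
                simpa [pvSumB] using this
              obtain ⟨hInv', hExt'⟩ := pvInv_insert g s0 d hInv hvfull hkey
              rw [hpl] at hpend
              refine ⟨gsz * pvFuelB gsz i + 1 + f, _, by omega, ?_, hInv', hExt', ?_⟩
              · show (match pvPendB d (c :: cs') with
                      | none => none
                      | some [] => pvLoopB g (gsz * pvFuelB gsz i + 1 + f) stack
                          (PySem.Dict.insert d n (some (if (c :: cs').isEmpty then 1 else pvSumB d (c :: cs'))))
                      | some (p :: ps) => pvLoopB g (gsz * pvFuelB gsz i + 1 + f)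
                          ((p :: ps).reverse ++ n :: stack) d) = _
                rw [hpend]
                simp only [List.isEmpty_cons, hsum]
                rfl
              · rw [PySem.Dict.get?_insert, if_pos rfl]
            | cons p ps =>
              -- push n back and the pending children on top
              rw [hpl] at hpend
              have hr : gsz * pvFuelB gsz i + 1 + f
                  = (p :: ps).reverse.length * pvFuelB gsz i
                    + (gsz * pvFuelB gsz i + 1 + f - (p :: ps).length * pvFuelB gsz i) := by
                have hple : (p :: ps).length ≤ (c :: cs').length := by
                  rw [← hpl]; exact List.length_filter_le _ _
                have : (p :: ps).length * pvFuelB gsz i ≤ gsz * pvFuelB gsz i :=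
                  Nat.mul_le_mul_right _ (le_trans hple hlen)
                simp only [List.length_reverse]
                omega
              obtain ⟨f2, d2, hf2, heq2, hInv2, hExt2, hmem2⟩ :=
                lst (p :: ps).reverse d (n :: stack)
                  (gsz * pvFuelB gsz i + 1 + f - (p :: ps).length * pvFuelB gsz i) hInv
                  (by
                    intro x hx
                    rw [List.mem_reverse] at hx
                    have hxcs : x ∈ (c :: cs') := (List.mem_filter.mp (hpl ▸ hx)).1
                    exact hchild x hxcs)
              have hfge : (p :: ps).length * pvFuelB gsz i ≤ gsz * pvFuelB gsz i := by
                have hple : (p :: ps).length ≤ (c :: cs').length := by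
                  rw [← hpl]; exact List.length_filter_le _ _
                exact Nat.mul_le_mul_right _ (le_trans hple hlen)
              have hf2f : f + 1 ≤ f2 := by omega
              -- second visit of n
              obtain ⟨f2', rfl⟩ : ∃ f2', f2 = f2' + 1 := ⟨f2 - 1, by omega⟩
              have hstep2 : pvLoopB g (f2' + 1) (n :: stack) d2 = pvLoopB g f2' stack
                  (PySem.Dict.insert d2 n (some vs.sum)) ∨
                  (PySem.Dict.get? d2 n = some (some vs.sum) ∧
                    pvLoopB g (f2' + 1) (n :: stack) d2 = pvLoopB g f2' stack d2) := by
                cases hd2 : PySem.Dict.get? d2 n with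
                | none => exact absurd ((hInv2.2.2 n).mp hd2) (fun hh => hkey ((hInv.2.2 n).mpr hh))
                | some o =>
                  cases o with
                  | some w =>
                    obtain ⟨j, hj⟩ := hInv2.1 n w hd2
                    have hwv : w = vs.sum := pvVal_uniq g s0 hj hvfull
                    subst hwv
                    right
                    refine ⟨rfl, ?_⟩
                    rw [pvLoopB, hd2]
                  | none =>
                    left
                    have hpresent2 : ∀ x ∈ (c :: cs'), PySem.Dict.get? d2 x ≠ none := by
                      intro x hx hnone
                      exact hpresent x hx ((hInv.2.2 x).mpr ((hInv2.2.2 x).mp hnone))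
                    have hmemo2 : ∀ x ∈ (c :: cs'), ∃ w, PySem.Dict.get? d2 x = some (some w) := by
                      intro x hx
                      by_cases hxp : x ∈ (p :: ps)
                      · obtain ⟨w, hw⟩ := hmem2 x (List.mem_reverse.mpr hxp)
                        exact ⟨w, hw⟩
                      · have hxs : PySem.Dict.get? d x ≠ some none := by
                          intro hh
                          exact hxp (hpl ▸ List.mem_filter.mpr ⟨hx, by simp [hh]⟩)
                        cases hgd : PySem.Dict.get? d x with
                        | none => exact absurd hgd (hpresent x hx)
                        | some o => cases o with
                          | none => exact absurd hgd hxs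
                          | some w => exact ⟨w, hExt2 x w hgd⟩
                    have hpend2 : pvPendB d2 (c :: cs') = some [] := by
                      rw [pvPendB_sound d2 (c :: cs') hpresent2]
                      congr 1
                      rw [List.filter_eq_nil_iff]
                      intro x hx
                      obtain ⟨w, hw⟩ := hmemo2 x hx
                      simp [hw]
                    have hsum2 : pvSumB d2 (c :: cs') = vs.sum := by
                      have := pvSumB_eq g s0 d2 i hInv2 (c :: cs') vs 0 hvs hmemo2
                      simpa [pvSumB] using this
                    rw [pvLoopB, hd2, hgn]
                    show (match pvPendB d2 (c :: cs') with
                          | none => none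
                          | some [] => pvLoopB g f2' stack
                              (PySem.Dict.insert d2 n (some (if (c :: cs').isEmpty then 1 else pvSumB d2 (c :: cs'))))
                          | some (p :: ps) => pvLoopB g f2' ((p :: ps).reverse ++ n :: stack) d2) = _
                    rw [hpend2]
                    simp [hsum2]
              -- assemble
              have heqfirst : pvLoopB g (gsz * pvFuelB gsz i + 1 + f)
                  ((p :: ps).reverse ++ n :: stack) d = pvLoopB g (f2' + 1) (n :: stack) d2 := by
                rw [hr]; exact heq2
              rcases hstep2 with hset | ⟨hd2v, hskip⟩
              · have hkey2 : PySem.Dict.get? d2 n ≠ none := by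
                  intro hh; exact hkey ((hInv.2.2 n).mpr ((hInv2.2.2 n).mp hh))
                obtain ⟨hInv', hExt'⟩ := pvInv_insert g s0 d2 hInv2 hvfull hkey2
                refine ⟨f2', _, by omega, ?_, hInv', fun m u hm => hExt' m u (hExt2 m u hm), ?_⟩
                · show (match pvPendB d (c :: cs') with
                        | none => none
                        | some [] => pvLoopB g (gsz * pvFuelB gsz i + 1 + f) stack
                            (PySem.Dict.insert d n (some (if (c :: cs').isEmpty then 1 else pvSumB d (c :: cs'))))
                        | some (p :: ps) => pvLoopB g (gsz * pvFuelB gsz i + 1 + f)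
                            ((p :: ps).reverse ++ n :: stack) d) = _
                  rw [hpend]
                  show pvLoopB g (gsz * pvFuelB gsz i + 1 + f) ((p :: ps).reverse ++ n :: stack) d = _
                  rw [heqfirst, hset]
                · rw [PySem.Dict.get?_insert, if_pos rfl]
              · refine ⟨f2', d2, by omega, ?_, hInv2, hExt2, hd2v⟩
                show (match pvPendB d (c :: cs') with
                      | none => none
                      | some [] => pvLoopB g (gsz * pvFuelB gsz i + 1 + f) stack
                          (PySem.Dict.insert d n (some (if (c :: cs').isEmpty then 1 else pvSumB d (c :: cs'))))
                      | some (p :: ps) => pvLoopB g (gsz * pvFuelB gsz i + 1 + f)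
                          ((p :: ps).reverse ++ n :: stack) d) = _
                rw [hpend]
                show pvLoopB g (gsz * pvFuelB gsz i + 1 + f) ((p :: ps).reverse ++ n :: stack) d = _
                rw [heqfirst, hskip]

-- ===== VERDICT (by name: the statement is the Claim_ definition above) =====
lemma pvGlue (node : Int) (graph : List (Int × List Int)) (salaries : List (Int × Option Int))
    (hpre : Pre_dfs node graph salaries) : dfs node graph salaries = dfs_alt node graph salaries := by
  unfold Pre_dfs at hpre
  set g := PySem.Dict.mk graph with hgdef
  set s0 := PySem.Dict.mk salaries with hs0def
  rw [pvStep_iterate_eq_settled g s0 (salaries.length + 1) node] at hpre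
  obtain ⟨v, hv⟩ := pvSettled_val g s0 (salaries.length + 1) node hpre
  obtain ⟨dA, hA, _, _⟩ := pvA_adeq g s0 (salaries.length + 1) node v s0 (salaries.length + 2)
    (pvInv_init g s0) hv (by omega)
  have hdfs : dfs node graph salaries = v := by unfold dfs; rw [← hgdef, ← hs0def, hA]
  rw [hdfs]
  unfold dfs_alt
  rw [← hgdef, ← hs0def]
  cases hs : PySem.Dict.get? s0 node with
  | none => exact absurd hs (pvVal_key g s0 hv)
  | some o =>
    cases o with
    | some w =>
      have hw1 : pvVal g s0 1 node = some w := by rw [pvVal, hs]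
      exact pvVal_uniq g s0 hv hw1
    | none =>
      have hgsz : ∀ n cs, PySem.Dict.get? g n = some cs →
          cs.length ≤ (graph.map (fun p => p.2.length)).sum := by
        intro n cs hget
        have hmem : (n, cs) ∈ graph := PySem.Dict.mem_items_of_get?_eq_some g hget
        exact List.le_sum_of_mem (List.mem_map.mpr ⟨(n, cs), hmem, rfl⟩)
      obtain ⟨f', d', hf', heq, hInv', hExt', hget⟩ :=
        pvB_adeq g s0 ((graph.map (fun p => p.2.length)).sum) hgsz (salaries.length + 1)
          node v s0 [] 0 (pvInv_init g s0) hv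
      rw [← Nat.add_zero (pvFuelB ((graph.map (fun p => p.2.length)).sum) (salaries.length + 1))]
      rw [heq]
      have hnil : pvLoopB g f' [] d' = some d' := by cases f' <;> rfl
      show v = (match pvLoopB g f' [] d' with
                | none => 0
                | some sal' =>
                  match PySem.Dict.get? sal' node with
                  | some (some v) => v
                  | _ => 0)
      rw [hnil]
      show v = (match PySem.Dict.get? d' node with
                | some (some v) => v
                | _ => 0)
      rw [hget]

theorem dfs_spec : Claim_equal_dfs := by
  intro node graph salaries _ hpre
  exact pvGlue node graph salaries hpre
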